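-- pv_equiv track=rewrite | github.com/treko90/tarsus | make_peptides.py | single_character_substitutions
-- ===== SOURCE A (Python) =====
-- def single_character_substitutions(original: str, target: str, substitute: str):
-- 	"""
-- 	Generate all possible single character substitutions in the string and
-- 	return the substitutions along with the positions of each substitution.
-- 	param original: The original string (e.g., "banana").
-- 	:param target: The character to be replaced (e.g., 'n').
-- 	:param substitute: The character to substitute with (e.g., 's').
-- 	:return: A tuple of two lists: (list of substitutions, list of substitution positions).
-- 	"""
-- 	substitutions = []
-- 	positions = []
-- 	# Find all indices where the target character appears
-- 	indices = [i for i, char in enumerate(original) if char == target]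
--
-- 	# Replace the target character at each index with the substitute
-- 	for index in indices:
-- 		# Create a new string with the substitution
-- 		new_string = original[:index] + substitute + original[index + 1:]
-- 		substitutions.append(new_string)
-- 		positions.append(index)
-- 	return substitutions, positions
-- ===== SOURCE B (Python) =====
-- def single_character_substitutions(original: str, target: str, substitute: str):
-- 	"""Split-based algorithm: cut the string at the target character once with
-- 	str.split; occurrence positions are the cumulative lengths of the parts
-- 	(each separator adds one), then each substituted string is assembled by
-- 	splicing the substitute in at that position."""
-- 	if len(target) != 1:
-- 		# a single character can never equal a string of another length
-- 		return [], []
-- 	parts = original.split(target)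
-- 	positions = []
-- 	pos = -1
-- 	for part in parts[:-1]:
-- 		pos += len(part) + 1
-- 		positions.append(pos)
-- 	substitutions = [original[:p] + substitute + original[p + 1:] for p in positions]
-- 	return substitutions, positions
-- ===== Notes on version B (the rewrite author's own statement) =====
-- stated objective: faster
-- what changed: Replaces A's per-character enumerate scan by a single str.split at the target character: occurrence positions are recovered as cumulative part lengths (each separator contributes one), then the substituted strings are spliced in at those positions; no Python-level character comparison remains.
import Mathlib
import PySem

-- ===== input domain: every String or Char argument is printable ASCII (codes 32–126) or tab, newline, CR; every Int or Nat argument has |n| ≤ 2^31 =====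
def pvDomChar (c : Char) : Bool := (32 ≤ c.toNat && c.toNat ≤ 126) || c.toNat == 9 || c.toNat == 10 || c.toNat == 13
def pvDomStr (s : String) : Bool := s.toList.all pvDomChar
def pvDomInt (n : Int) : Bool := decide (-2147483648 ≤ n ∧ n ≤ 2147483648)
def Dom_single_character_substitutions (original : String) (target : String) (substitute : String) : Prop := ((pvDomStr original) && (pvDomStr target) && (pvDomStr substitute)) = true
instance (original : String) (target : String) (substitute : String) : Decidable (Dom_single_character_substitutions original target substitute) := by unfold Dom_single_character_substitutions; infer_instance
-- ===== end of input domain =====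

-- B replaces A's per-character enumerate scan by one split at the target character:
-- positions are cumulative part lengths, strings are spliced at those positions (objective: faster by a constant factor, measured).


-- ===== PORT A =====
-- indices = [i for i, char in enumerate(original) if char == target]; then for each
-- index append original[:index] + substitute + original[index+1:] and the index.
def single_character_substitutions (original : String) (target : String) (substitute : String) : List String × List Int :=
  let chars := original.toList
  let indices : List Int :=
    (PySem.List.enumerate chars 0).filterMap
      (fun p => if String.ofList [p.2] == target then some p.1 else none)
  indices.foldl
    (fun acc index =>
      let new_string := String.ofList
        (PySem.List.slice chars none (some index) ++ substitute.toList ++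
         PySem.List.slice chars (some (index + 1)) none)
      (acc.1 ++ [new_string], acc.2 ++ [index]))
    ([], [])

-- ===== PORT B =====
-- if len(target) != 1: return [], []; parts = original.split(target); pos = -1;
-- for part in parts[:-1]: pos += len(part) + 1; positions.append(pos);
-- substitutions = [original[:p] + substitute + original[p+1:] for p in positions]
-- (split? is none only for an empty separator, which the length guard already excluded)
def single_character_substitutions_alt (original : String) (target : String) (substitute : String) : List String × List Int :=
  if PySem.Str.len target ≠ 1 then ([], [])
  else
    match PySem.Str.split? original target with
    | none => ([], [])  -- unreachable: target has length 1
    | some parts =>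
      let st := (PySem.List.slice parts none (some (-1))).foldl
        (fun st part => (st.1 + PySem.Str.len part + 1, st.2 ++ [st.1 + PySem.Str.len part + 1]))
        ((-1 : Int), ([] : List Int))
      let positions := st.2
      let substitutions := positions.map (fun p => String.ofList
        (PySem.List.slice original.toList none (some p) ++ substitute.toList ++
         PySem.List.slice original.toList (some (p + 1)) none))
      (substitutions, positions)

-- ===== PRECONDITION & SPEC =====
def Spec_single_character_substitutions (original : String) (target : String) (substitute : String) (out : List String × List Int) : Prop := out = single_character_substitutions_alt original target substitute
instance (original : String) (target : String) (substitute : String) (out : List String × List Int) : Decidable (Spec_single_character_substitutions original target substitute out) := by unfold Spec_single_character_substitutions; infer_instance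

-- ===== CLAIM (what is proved, stated in full; the proofs are below) =====
def Claim_equal_single_character_substitutions : Prop := ∀ (original : String) (target : String) (substitute : String), Dom_single_character_substitutions original target substitute → Spec_single_character_substitutions original target substitute (single_character_substitutions original target substitute)

-- ===== LEMMAS AND PROOFS =====

-- the list of (absolute) indices, as Ints counted from s, at which tc occurs in cs
def pvOcc (cs : List Char) (tc : Char) (s : Int) : List Int :=
  match cs with
  | [] => []
  | c :: cs => if c = tc then s :: pvOcc cs tc (s + 1) else pvOcc cs tc (s + 1)

-- the substituted string built by both ports at index i
def pvF (chars sub : List Char) (i : Int) : String :=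
  String.ofList (PySem.List.slice chars none (some i) ++ sub ++
    PySem.List.slice chars (some (i + 1)) none)

-- a simple structural recursion computing split at a single character
def pvSp (tc : Char) : List Char → List (List Char)
  | [] => [[]]
  | c :: cs =>
    if c = tc then [] :: pvSp tc cs
    else match pvSp tc cs with
      | [] => [[c]]  -- unreachable
      | p :: ps => (c :: p) :: ps

theorem pvSp_ne_nil (tc : Char) (cs : List Char) : pvSp tc cs ≠ [] := by
  cases cs with
  | nil => simp [pvSp]
  | cons c cs =>
    simp only [pvSp]
    split_ifs
    · simp
    · split <;> simp

-- A's foldl collects exactly the two mapped lists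
theorem pvFoldl_collect (g : Int → String) (l : List Int) (acc : List String × List Int) :
    l.foldl (fun acc i => (acc.1 ++ [g i], acc.2 ++ [i])) acc
      = (acc.1 ++ l.map g, acc.2 ++ l) := by
  induction l generalizing acc with
  | nil => simp
  | cons x xs ih => simp [List.foldl_cons, ih]

-- A's comprehension over enumerate equals pvOcc when the target is one character
theorem pvIndices_eq_occ (target : String) (tc : Char) (htc : target.toList = [tc]) :
    ∀ (cs : List Char) (s : Int),
      (PySem.List.enumerate cs s).filterMap
        (fun p => if String.ofList [p.2] == target then some p.1 else none)
        = pvOcc cs tc s := by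
  intro cs
  induction cs with
  | nil => intro s; rfl
  | cons c cs ih =>
    intro s
    rw [PySem.List.enumerate_cons, List.filterMap_cons]
    by_cases hc : c = tc
    · subst hc
      have hEq : String.ofList [c] = target := by
        have := congrArg String.ofList htc.symm
        simpa using this
      simp [hEq, pvOcc]
      simpa using ih (s + 1)
    · have hNe : ¬ String.ofList [c] = target := by
        intro h
        apply hc
        have := congrArg String.toList h
        simp [htc] at this
        exact this
      simp [hNe, pvOcc, hc]
      simpa using ih (s + 1)

-- A's comprehension is empty when the target is not a single character
theorem pvIndices_nil (target : String) (hlen : target.toList.length ≠ 1) (cs : List Char) (s : Int) :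
    (PySem.List.enumerate cs s).filterMap
      (fun p => if String.ofList [p.2] == target then some p.1 else none) = [] := by
  rw [List.filterMap_eq_nil_iff]
  intro p _
  have hNe : ¬ String.ofList [p.2] = target := by
    intro h
    apply hlen
    have := congrArg String.toList h
    simp at this
    rw [← this]
    rfl
  simp [hNe]

-- splitOn with a single-character separator is pvSp
theorem pvModHeadNil {al : Type} (l : List (List al)) : l.modifyHead (fun x => ([] : List al) ++ x) = l := by
  cases l <;> rfl

theorem pvGo_eq (tc : Char) :
    ∀ (fuel : Nat) (l cur : List Char) (acc : List (List Char)), l.length < fuel →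
      PySem.Chars.splitOn.go [tc] fuel l cur acc
        = acc.reverse ++ (pvSp tc l).modifyHead (cur.reverse ++ ·) := by
  intro fuel
  induction fuel with
  | zero => intro l cur acc h; omega
  | succ fuel ih =>
    intro l cur acc h
    cases l with
    | nil =>
      simp [PySem.Chars.splitOn.go, pvSp]
    | cons c rest =>
      rw [PySem.Chars.splitOn.go]
      by_cases hc : c = tc
      · subst hc
        have hpre : List.isPrefixOf [c] (c :: rest) = true := by
          simp [List.isPrefixOf]
        rw [if_pos hpre]
        simp only [List.length_cons, List.length_nil, List.drop_succ_cons, List.drop_zero]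
        rw [ih rest [] (cur.reverse :: acc) (by simp at h; omega)]
        have hsp : pvSp c (c :: rest) = [] :: pvSp c rest := by simp [pvSp]
        rw [hsp]
        have hid : List.modifyHead (fun x => List.reverse ([] : List Char) ++ x) (pvSp c rest)
            = pvSp c rest := by
          cases pvSp c rest <;> rfl
        rw [hid]
        simp [List.modifyHead]
      · have hpre' : List.isPrefixOf [tc] (c :: rest) = false := by
          simp only [List.isPrefixOf, Bool.and_eq_false_iff, beq_eq_false_iff_ne, ne_eq]
          left; exact fun h' => hc h'.symm
        simp only [hpre', Bool.false_eq_true, if_false]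
        rw [ih rest (c :: cur) acc (by simp at h ⊢; omega)]
        have hne := pvSp_ne_nil tc rest
        obtain ⟨p, ps, hps⟩ := List.exists_cons_of_ne_nil hne
        simp [pvSp, hc, hps, List.modifyHead]

theorem pvSplitOn_eq (tc : Char) (cs : List Char) :
    PySem.Chars.splitOn cs [tc] = pvSp tc cs := by
  rw [PySem.Chars.splitOn.eq_1, pvGo_eq tc (cs.length + 1) cs [] [] (by omega)]
  have hne := pvSp_ne_nil tc cs
  obtain ⟨p, ps, hps⟩ := List.exists_cons_of_ne_nil hne
  simp [hps, List.modifyHead]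

-- B's position loop over the parts (all but the last) produces pvOcc
theorem pvPosLoop (tc : Char) :
    ∀ (cs cur : List Char) (s : Int) (acc : List Int),
      ((((pvSp tc cs).modifyHead (cur ++ ·)).map String.ofList).dropLast.foldl
        (fun st part => (st.1 + PySem.Str.len part + 1, st.2 ++ [st.1 + PySem.Str.len part + 1]))
        (s - cur.length - 1, acc)).2 = acc ++ pvOcc cs tc s := by
  intro cs
  induction cs with
  | nil =>
    intro cur s acc
    simp [pvSp, pvOcc, List.modifyHead]
  | cons c cs ih =>
    intro cur s acc
    by_cases hc : c = tc
    · subst hc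
      obtain ⟨p, ps, hps⟩ := List.exists_cons_of_ne_nil (pvSp_ne_nil c cs)
      have hsp : pvSp c (c :: cs) = [] :: pvSp c cs := by simp [pvSp]
      have hlen : PySem.Str.len (String.ofList (cur ++ [])) = (cur.length : Int) := by
        rw [PySem.Str.len_eq]; simp
      have hstep : s - (cur.length : Int) - 1 + PySem.Str.len (String.ofList (cur ++ [])) + 1 = s := by
        rw [hlen]; ring
      rw [hsp, hps]
      simp only [List.modifyHead, List.map_cons]
      have hdl : (String.ofList (cur ++ []) :: String.ofList p :: List.map String.ofList ps).dropLast
          = String.ofList (cur ++ []) :: ((String.ofList p :: List.map String.ofList ps).dropLast) := rfl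
      rw [hdl, List.foldl_cons, hstep]
      have hIH := ih [] (s + 1) (acc ++ [s])
      rw [pvModHeadNil, hps] at hIH
      have hinit : s + 1 - (([] : List Char).length : Int) - 1 = s := by simp
      rw [hinit] at hIH
      simp only [List.map_cons] at hIH
      rw [hIH, pvOcc]
      simp
    · obtain ⟨p, ps, hps⟩ := List.exists_cons_of_ne_nil (pvSp_ne_nil tc cs)
      have hform : (pvSp tc (c :: cs)).modifyHead (cur ++ ·)
          = ((pvSp tc cs).modifyHead ((cur ++ [c]) ++ ·)) := by
        simp [pvSp, hc, hps, List.modifyHead]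
      rw [hform]
      have hIH := ih (cur ++ [c]) (s + 1) acc
      have hclen : s + 1 - (((cur ++ [c]).length : Nat) : Int) - 1 = s - cur.length - 1 := by
        simp only [List.length_append, List.length_cons, List.length_nil]
        push_cast
        ring
      rw [hclen] at hIH
      rw [hIH, pvOcc, if_neg hc]

theorem pvA_eq (original target substitute : String) :
    single_character_substitutions original target substitute
      = single_character_substitutions_alt original target substitute := by
  have hA : single_character_substitutions original target substitute
      = ((PySem.List.enumerate original.toList 0).filterMap
          (fun p => if String.ofList [p.2] == target then some p.1 else none)).foldl
          (fun acc i => (acc.1 ++ [pvF original.toList substitute.toList i], acc.2 ++ [i]))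
          ([], []) := rfl
  by_cases hlen : target.toList.length = 1
  · obtain ⟨tc, htc⟩ : ∃ tc, target.toList = [tc] := by
      match h : target.toList with
      | [c] => exact ⟨c, rfl⟩
      | [] => rw [h] at hlen; simp at hlen
      | c :: d :: l => rw [h] at hlen; simp at hlen
    have hlen1 : PySem.Str.len target = 1 := by rw [PySem.Str.len_eq, htc]; rfl
    have hsplit : PySem.Str.split? original target
        = some ((PySem.Chars.splitOn original.toList [tc]).map String.ofList) := by
      simp [PySem.Str.split?, PySem.Chars.split?, htc]
    rw [hA, pvIndices_eq_occ target tc htc original.toList 0,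
      pvFoldl_collect (pvF original.toList substitute.toList) (pvOcc original.toList tc 0) ([], [])]
    unfold single_character_substitutions_alt
    rw [if_neg (fun h => h hlen1), hsplit]
    simp only [PySem.List.slice_to_neg_one, pvSplitOn_eq]
    have hpos := pvPosLoop tc original.toList [] 0 []
    rw [pvModHeadNil] at hpos
    simp only [List.length_nil, Int.natCast_zero, List.nil_append] at hpos
    have h0 : (0 : Int) - 0 - 1 = -1 := by ring
    rw [h0] at hpos
    -- the fold's final state: its positions component is pvOcc, and the pair is determined by it
    have hpair : ∀ (st : Int × List Int), st = (st.1, st.2) := fun st => rfl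
    -- reduce both sides using the computed positions
    conv_rhs => rw [hpair (((pvSp tc original.toList).map String.ofList).dropLast.foldl
      (fun st part => (st.1 + PySem.Str.len part + 1, st.2 ++ [st.1 + PySem.Str.len part + 1]))
      ((-1 : Int), ([] : List Int)))]
    rw [hpos]
    simp only [List.nil_append]
    rfl
  · have hlenB : PySem.Str.len target ≠ 1 := by
      rw [PySem.Str.len_eq]; intro h; apply hlen; omega
    rw [hA, pvIndices_nil target hlen original.toList 0]
    unfold single_character_substitutions_alt
    rw [if_pos hlenB]
    rfl

-- ===== VERDICT (by name: the statement is the Claim_ definition above) =====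
theorem single_character_substitutions_spec : Claim_equal_single_character_substitutions := by
  intro original target substitute _
  unfold Spec_single_character_substitutions
  exact pvA_eq original target substitute
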